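-- pv_equiv track=rewrite | github.com/egorvts/Kattis | GuessingGame/solution.py | solution
-- ===== SOURCE A (Python) =====
-- def solution(game: dict) -> str:
--     final_guess = list(game.keys())[-1]
--
--     for i in game:
--         response = game[i]
--         if response == "too low" and final_guess < i:
--             return "Stan is dishonest"
--         elif response == "too high" and final_guess > i:
--             return "Stan is dishonest"
--         elif response == "right on" and final_guess != i:
--             return "Stan is dishonest"
--
--     return "Stan may be honest"
-- ===== SOURCE B (Python) =====
-- def solution(game: dict) -> str:
--     final_guess = list(game)[-1]
--     max_low = None
--     min_high = None
--     right_ok = True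
--     for i, r in game.items():
--         if r == "too low":
--             if max_low is None or i > max_low:
--                 max_low = i
--         elif r == "too high":
--             if min_high is None or i < min_high:
--                 min_high = i
--         elif r == "right on":
--             right_ok = right_ok and i == final_guess
--     bad = (max_low is not None and final_guess < max_low) or \
--           (min_high is not None and final_guess > min_high) or \
--           not right_ok
--     return "Stan is dishonest" if bad else "Stan may be honest"
-- ===== Notes on version B (the rewrite author's own statement) =====
-- stated objective: alternative
-- what changed: Replaces A's check-and-early-return per-entry branch chain with a summarize-then-decide pass: one fold accumulates max 'too low' key, min 'too high' key and a right-on flag, and a single final comparison against the last key decides the answer.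
-- outside the precondition, e.g. on solution({}): A raises IndexError, B raises IndexError
import Mathlib
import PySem

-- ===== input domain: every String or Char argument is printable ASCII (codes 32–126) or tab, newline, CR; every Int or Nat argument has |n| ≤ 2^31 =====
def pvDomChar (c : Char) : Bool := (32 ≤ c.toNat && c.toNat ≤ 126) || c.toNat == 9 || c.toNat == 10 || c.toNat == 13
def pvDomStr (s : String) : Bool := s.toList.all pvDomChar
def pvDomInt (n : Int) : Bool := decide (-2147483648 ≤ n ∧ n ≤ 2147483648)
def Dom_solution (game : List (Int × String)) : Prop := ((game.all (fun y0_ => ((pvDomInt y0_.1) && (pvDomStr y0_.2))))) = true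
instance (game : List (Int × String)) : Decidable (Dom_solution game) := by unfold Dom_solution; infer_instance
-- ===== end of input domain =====

-- B replaces A's early-returning per-entry branch chain with a summarize-then-decide
-- single pass (fold to max 'too low' key / min 'too high' key / right-on flag); same cost.


-- ===== PORT A =====
-- for i in game: response = game[i]; three early-return checks; else "Stan may be honest"
def solutionGo (game : List (Int × String)) (fg : Int) : List Int → String
  | [] => "Stan may be honest"
  | i :: rest =>
    let response := (PySem.Dict.mk game).getD i ""
    if response = "too low" ∧ fg < i then "Stan is dishonest"
    else if response = "too high" ∧ fg > i then "Stan is dishonest"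
    else if response = "right on" ∧ fg ≠ i then "Stan is dishonest"
    else solutionGo game fg rest

def solution (game : List (Int × String)) : String :=
  -- final_guess = list(game.keys())[-1]; IndexError on an empty dict is excluded by Pre_
  match PySem.List.pyGet? (game.map Prod.fst) (-1) with
  | none => ""
  | some fg => solutionGo game fg (game.map Prod.fst)

-- ===== PORT B =====
-- one fold over the items accumulating (max_low, min_high, right_ok)
def altStep (fg : Int) (s : Option Int × Option Int × Bool) (p : Int × String) :
    Option Int × Option Int × Bool :=
  if p.2 = "too low" then
    (some (match s.1 with | none => p.1 | some m => if p.1 > m then p.1 else m), s.2.1, s.2.2)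
  else if p.2 = "too high" then
    (s.1, some (match s.2.1 with | none => p.1 | some m => if p.1 < m then p.1 else m), s.2.2)
  else if p.2 = "right on" then
    (s.1, s.2.1, s.2.2 && (p.1 == fg))
  else s

def solution_alt (game : List (Int × String)) : String :=
  match PySem.List.pyGet? (game.map Prod.fst) (-1) with
  | none => ""
  | some fg =>
    let s := game.foldl (altStep fg) (none, none, true)
    let bad := (match s.1 with | none => false | some m => decide (fg < m)) ||
               (match s.2.1 with | none => false | some m => decide (fg > m)) ||
               !s.2.2
    if bad then "Stan is dishonest" else "Stan may be honest"

-- ===== PRECONDITION & SPEC =====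
-- Pre_ excludes the empty list (A raises IndexError on an empty dict) and lists with duplicate
-- keys (they do not represent a Python dict; first-match lookup there is an artefact of the encoding).
def Pre_solution (game : List (Int × String)) : Prop :=
  game ≠ [] ∧ (game.map Prod.fst).Nodup
instance (game : List (Int × String)) : Decidable (Pre_solution game) := by
  unfold Pre_solution; infer_instance
def pvWitness_solution : (List (Int × String)) := [(3, "too low"), (5, "right on")]

def Spec_solution (game : List (Int × String)) (out : String) : Prop := out = solution_alt game
instance (game : List (Int × String)) (out : String) : Decidable (Spec_solution game out) := by
  unfold Spec_solution; infer_instance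

-- ===== CLAIM (what is proved, stated in full; the proofs are below) =====
def Claim_equal_solution : Prop := ∀ (game : List (Int × String)), Dom_solution game → Pre_solution game → Spec_solution game (solution game)

-- ===== LEMMAS AND PROOFS =====

-- one entry violates consistency with the final guess
def viol (fg : Int) (p : Int × String) : Bool :=
  (p.2 == "too low" && decide (fg < p.1)) || (p.2 == "too high" && decide (fg > p.1)) ||
  (p.2 == "right on" && !(fg == p.1))

-- the final decision B takes on an accumulated state
def bad (fg : Int) (s : Option Int × Option Int × Bool) : Bool :=
  (match s.1 with | none => false | some m => decide (fg < m)) ||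
  (match s.2.1 with | none => false | some m => decide (fg > m)) ||
  !s.2.2

theorem goA_eq_any (fg : Int) (cur pre : List (Int × String))
    (h : ((pre ++ cur).map Prod.fst).Nodup) :
    solutionGo (pre ++ cur) fg (cur.map Prod.fst) =
      if cur.any (viol fg) then "Stan is dishonest" else "Stan may be honest" := by
  induction cur generalizing pre with
  | nil => simp [solutionGo]
  | cons p rest ih =>
    obtain ⟨i, r⟩ := p
    have hlook : (PySem.Dict.mk (pre ++ (i, r) :: rest)).getD i "" = r :=
      PySem.Dict.getD_of_mem_items _ (by simp) (by simpa [PySem.Dict.keys] using h) ""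
    have hrec := ih (pre ++ [(i, r)]) (by simpa using h)
    simp only [List.append_assoc, List.cons_append, List.nil_append] at hrec
    simp only [List.map_cons, solutionGo, hlook, List.any_cons]
    rw [hrec]
    by_cases c1 : r = "too low" ∧ fg < i
    · obtain ⟨hr, hlt⟩ := c1; subst hr; simp [viol, hlt]
    · by_cases c2 : r = "too high" ∧ fg > i
      · obtain ⟨hr, hgt⟩ := c2; subst hr; simp [viol, hgt]
      · by_cases c3 : r = "right on" ∧ fg ≠ i
        · obtain ⟨hr, hne⟩ := c3; subst hr; simp [viol, hne]
        · rw [if_neg c1, if_neg c2, if_neg c3]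
          have hv : viol fg (i, r) = false := by
            simp only [viol, Bool.or_eq_false_iff, Bool.and_eq_false_iff]
            push Not at c1 c2 c3
            refine ⟨⟨?_, ?_⟩, ?_⟩
            · by_cases hr : r = "too low"
              · right; simpa using c1 hr
              · left; simpa using hr
            · by_cases hr : r = "too high"
              · right; simpa using c2 hr
              · left; simpa using hr
            · by_cases hr : r = "right on"
              · right; simpa using c3 hr
              · left; simpa using hr
          simp only [hv, Bool.false_or]

theorem decide_lt_max (fg i m : Int) :
    decide (fg < (if i > m then i else m)) = (decide (fg < m) || decide (fg < i)) := by
  split_ifs with h <;> rw [Bool.eq_iff_iff] <;> simp <;> omega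

theorem decide_gt_min (fg i m : Int) :
    decide ((if i < m then i else m) < fg) = (decide (m < fg) || decide (i < fg)) := by
  split_ifs with h <;> rw [Bool.eq_iff_iff] <;> simp <;> omega

theorem beq_comm_int (a b : Int) : (a == b) = (b == a) := by
  by_cases h : a = b
  · simp [h]
  · rw [beq_eq_false_iff_ne.mpr h, beq_eq_false_iff_ne.mpr (fun hh => h hh.symm)]

theorem bad_step (fg : Int) (s : Option Int × Option Int × Bool) (p : Int × String) :
    bad fg (altStep fg s p) = (bad fg s || viol fg p) := by
  obtain ⟨ml, mh, ok⟩ := s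
  obtain ⟨i, r⟩ := p
  simp only [altStep, viol, bad]
  by_cases h1 : r = "too low"
  · subst h1
    cases ml <;> cases mh <;> cases ok <;>
      simp [decide_lt_max, Bool.or_comm, Bool.or_assoc]
  · by_cases h2 : r = "too high"
    · subst h2
      cases ml <;> cases mh <;> cases ok <;>
        simp [h1, decide_gt_min, Bool.or_comm, Bool.or_left_comm]
    · by_cases h3 : r = "right on"
      · subst h3
        cases ml <;> cases mh <;> cases ok <;>
          simp [h1, h2, Bool.or_comm, beq_comm_int]
      · simp [h1, h2, h3]

theorem bad_foldl (fg : Int) (l : List (Int × String)) (s : Option Int × Option Int × Bool) :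
    bad fg (l.foldl (altStep fg) s) = (bad fg s || l.any (viol fg)) := by
  induction l generalizing s with
  | nil => simp
  | cons p rest ih => simp [List.foldl_cons, ih, bad_step, Bool.or_assoc]

-- ===== VERDICT (by name: the statement is the Claim_ definition above) =====
theorem solution_spec : Claim_equal_solution := by
  intro game _ hpre
  unfold Spec_solution solution solution_alt
  cases hget : PySem.List.pyGet? (game.map Prod.fst) (-1) with
  | none => rfl
  | some fg =>
    dsimp only
    have hA := goA_eq_any fg game [] (by simpa using hpre.2)
    rw [List.nil_append] at hA
    rw [hA]
    have hB := bad_foldl fg game (none, none, true)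
    have h0 : bad fg ((none : Option Int), (none : Option Int), true) = false := rfl
    rw [h0, Bool.false_or] at hB
    show _ = if bad fg (game.foldl (altStep fg) (none, none, true)) = true
        then "Stan is dishonest" else "Stan may be honest"
    rw [hB]
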